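-- pv_equiv track=rewrite | github.com/ZckFreedom/Mathworks | new_psr.py | twoZero_shift
-- ===== SOURCE A (Python) =====
-- def if_nk(s_sequence):      #必须输入n+1长的cycle，输出是否是nk结果
--     period = 1
--     order = len(s_sequence)
--     for i in range(1, order):
--         if s_sequence[i] > s_sequence[i-period]:
--             period = i+1
--         elif s_sequence[i] < s_sequence[i-period]:
--             return False
--     return order % period == 0
--
-- def twoZero_shift(s_sequence, k):       #输入以0开头的状态,直接输出移k位是否是nk结果
--     order = len(s_sequence)
--     state = s_sequence[:]
--     state = [0] + state
--     state += state
--     cnt = 0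
--     i = 0
--
--     while cnt < k:
--         i = (i + 1) % (order + 1)
--         if state[i] == 0 and state[i + 1] == 0:
--             cnt += 1
--
--     return if_nk(state[i:i+order+1])
-- ===== SOURCE B (Python) =====
-- def twoZero_shift(s_sequence, k):
--     # O(n): collect the double-zero positions of one period once, index by (k-1) mod count,
--     # then run the necklace (nk) test on the rotation.
--     n = len(s_sequence) + 1
--     c = [0] + s_sequence
--     if k <= 0:
--         i = 0
--     else:
--         hits = [t % n for t in range(1, n + 1)
--                 if c[t % n] == 0 and c[(t + 1) % n] == 0]
--         i = hits[(k - 1) % len(hits)]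
--     rot = c[i:] + c[:i]
--     period = 1
--     for idx in range(1, n):
--         if rot[idx] < rot[idx - period]:
--             return False
--         if rot[idx] > rot[idx - period]:
--             period = idx + 1
--     return n % period == 0
-- ===== Notes on version B (the rewrite author's own statement) =====
-- stated objective: faster
-- what changed: A steps i through the doubled cycle one position at a time counting double-zero hits until the k-th (O(k) iterations); B collects the double-zero positions of a single period once and picks the shift position directly as hits[(k-1) mod len(hits)], then runs the same necklace test on the rotation.
-- outside the precondition, e.g. on twoZero_shift([1], 1): A does not finish within the time limit, B raises ZeroDivisionError
import Mathlib
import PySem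

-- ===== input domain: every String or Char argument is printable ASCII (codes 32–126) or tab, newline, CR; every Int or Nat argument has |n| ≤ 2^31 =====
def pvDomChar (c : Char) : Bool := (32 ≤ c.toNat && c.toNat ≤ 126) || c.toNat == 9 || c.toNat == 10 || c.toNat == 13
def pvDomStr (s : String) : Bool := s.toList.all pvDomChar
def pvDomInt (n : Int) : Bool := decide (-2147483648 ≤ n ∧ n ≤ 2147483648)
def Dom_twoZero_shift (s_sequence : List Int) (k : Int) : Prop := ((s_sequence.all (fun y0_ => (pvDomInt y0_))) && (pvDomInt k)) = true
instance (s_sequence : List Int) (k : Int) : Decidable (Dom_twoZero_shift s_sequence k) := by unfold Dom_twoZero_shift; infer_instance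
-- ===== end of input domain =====

-- B replaces A's step-by-step shifting loop (one iteration per position until the k-th
-- double-zero hit) by collecting the double-zero positions of one period once and indexing
-- with (k-1) mod count; the necklace test on the resulting rotation is unchanged.

-- ===== PORT A =====
-- if_nk's for-loop with early 'return False': Option Nat accumulator (none = returned False).
-- All list indices reached by the Python are nonnegative and in range (period ≤ i), so getD is exact.
def ifNkGo (s : List Int) : List Nat → Nat → Option Nat
  | [], period => some period
  | i :: rest, period =>
    if s.getD i 0 > s.getD (i - period) 0 then ifNkGo s rest (i + 1)
    else if s.getD i 0 < s.getD (i - period) 0 then none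
    else ifNkGo s rest period

def ifNk (s_sequence : List Int) : Bool :=
  match ifNkGo s_sequence (List.range' 1 (s_sequence.length - 1)) 1 with
  | none => false
  | some period => s_sequence.length % period == 0

-- A's while-loop, ported with fuel k·(order+1): under Pre_ the loop stops within that many
-- iterations (the k-th double-zero hit is reached); state[i] is always in range, so pyGetD is exact.
def aLoop (state : List Int) (n k : Int) : Nat → Int → Int → Int
  | 0, _, i => i
  | fuel + 1, cnt, i =>
    if cnt < k then
      let i' := PySem.Int.mod (i + 1) n
      if PySem.List.pyGetD state i' 0 == 0 && PySem.List.pyGetD state (i' + 1) 0 == 0 then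
        aLoop state n k fuel (cnt + 1) i'
      else
        aLoop state n k fuel cnt i'
    else i

def twoZero_shift (s_sequence : List Int) (k : Int) : Bool :=
  let order := s_sequence.length
  let state := (0 :: s_sequence) ++ (0 :: s_sequence)
  let i := aLoop state ((order : Int) + 1) k (k.toNat * (order + 1)) 0 0
  ifNk (PySem.List.slice state (some i) (some (i + (order : Int) + 1)))

-- ===== PORT B =====
-- the body of Source B's necklace for-loop (early 'return False' = none accumulator)
def bStep (rot : List Int) (acc : Option Nat) (idx : Nat) : Option Nat :=
  match acc with
  | none => none
  | some period =>
    if rot.getD idx 0 < rot.getD (idx - period) 0 then none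
    else if rot.getD idx 0 > rot.getD (idx - period) 0 then some (idx + 1)
    else some period

def bNecklace (rot : List Int) (n : Nat) : Bool :=
  match (List.range' 1 (n - 1)).foldl (bStep rot) (some 1) with
  | none => false
  | some period => n % period == 0

def twoZero_shift_alt (s_sequence : List Int) (k : Int) : Bool :=
  let n := s_sequence.length + 1
  let c := 0 :: s_sequence
  let i : Nat :=
    if k ≤ 0 then 0
    else
      -- hits = [t % n for t in range(1, n+1) if c[t % n] == 0 and c[(t+1) % n] == 0]
      let hits := ((List.range' 1 n).filter
        (fun t => c.getD (t % n) 0 == 0 && c.getD ((t + 1) % n) 0 == 0)).map (· % n)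
      hits.getD (PySem.Int.mod (k - 1) (hits.length : Int)).toNat 0
  let rot := c.drop i ++ c.take i
  bNecklace rot n

-- ===== PRECONDITION & SPEC =====
-- Pre_ excludes exactly the inputs where A never returns: k > 0 while the cycle [0]+s has no
-- cyclically adjacent pair of zeros — there A's while-loop runs forever (and B raises).
def Pre_twoZero_shift (s_sequence : List Int) (k : Int) : Prop :=
  k ≤ 0 ∨ ∃ j ∈ List.range (s_sequence.length + 1),
    (0 :: s_sequence).getD j 0 = 0 ∧
    (0 :: s_sequence).getD ((j + 1) % (s_sequence.length + 1)) 0 = 0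
instance (s_sequence : List Int) (k : Int) : Decidable (Pre_twoZero_shift s_sequence k) := by
  unfold Pre_twoZero_shift; infer_instance

def pvWitness_twoZero_shift : List Int × Int := ([0, 1, 0], 3)

def Spec_twoZero_shift (s_sequence : List Int) (k : Int) (out : Bool) : Prop := out = twoZero_shift_alt s_sequence k
instance (s_sequence : List Int) (k : Int) (out : Bool) : Decidable (Spec_twoZero_shift s_sequence k out) := by unfold Spec_twoZero_shift; infer_instance

-- ===== CLAIM (what is proved, stated in full; the proofs are below) =====
def Claim_equal_twoZero_shift : Prop := ∀ (s_sequence : List Int) (k : Int), Dom_twoZero_shift s_sequence k → Pre_twoZero_shift s_sequence k → Spec_twoZero_shift s_sequence k (twoZero_shift s_sequence k)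

-- ===== LEMMAS AND PROOFS =====

-- canonical double-zero test at position j of the cycle c
def dz (c : List Int) (j : Nat) : Bool :=
  (c.getD j 0 == 0) && (c.getD ((j + 1) % c.length) 0 == 0)

-- number of double-zero hits counted by A's loop during the first t iterations (from i = 0)
def cntA (c : List Int) : Nat → Nat
  | 0 => 0
  | t + 1 => cntA c t + (if dz c ((t + 1) % c.length) then 1 else 0)

theorem foldl_bStep_none (s : List Int) (l : List Nat) :
    l.foldl (bStep s) none = none := by
  induction l with
  | nil => rfl
  | cons a l ih => simpa [bStep] using ih

theorem ifNkGo_eq_foldl (s : List Int) (l : List Nat) :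
    ∀ p, ifNkGo s l p = l.foldl (bStep s) (some p) := by
  induction l with
  | nil => intro p; rfl
  | cons a l ih =>
    intro p
    rw [List.foldl_cons]
    rcases lt_trichotomy (s.getD a 0) (s.getD (a - p) 0) with h | h | h
    · have e : bStep s (some p) a = none := by
        simp only [bStep]; rw [if_pos h]
      rw [e, foldl_bStep_none, ifNkGo, if_neg (lt_asymm h), if_pos h]
    · have e : bStep s (some p) a = some p := by
        simp only [bStep]; rw [if_neg (by omega), if_neg (by omega)]
      rw [e, ifNkGo, if_neg (by omega), if_neg (by omega), ih]
    · have e : bStep s (some p) a = some (a + 1) := by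
        simp only [bStep]; rw [if_neg (lt_asymm h), if_pos h]
      rw [e, ifNkGo, if_pos h, ih]

theorem ifNk_eq_bNecklace (rot : List Int) : ifNk rot = bNecklace rot rot.length := by
  simp only [ifNk, bNecklace, ifNkGo_eq_foldl]

theorem aLoop_stop (state : List Int) (n k : Int) (fuel : Nat) (cnt i : Int)
    (h : ¬ cnt < k) : aLoop state n k fuel cnt i = i := by
  cases fuel <;> simp [aLoop, h]

theorem getD_append_self_left (c : List Int) (j : Nat) (hj : j < c.length) :
    (c ++ c).getD j 0 = c.getD j 0 := by
  simp [List.getD_eq_getElem?_getD, List.getElem?_append_left hj]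

theorem getD_append_self_mod (c : List Int) (j : Nat) (hj : j < c.length) :
    (c ++ c).getD (j + 1) 0 = c.getD ((j + 1) % c.length) 0 := by
  rcases Nat.lt_or_ge (j + 1) c.length with h | h
  · rw [Nat.mod_eq_of_lt h]
    simp [List.getD_eq_getElem?_getD, List.getElem?_append_left h]
  · have h1 : j + 1 = c.length := by omega
    simp [List.getD_eq_getElem?_getD, h1, List.getElem?_append_right (Nat.le_refl c.length)]

theorem state_test (c : List Int) (j : Nat) (hj : j < c.length) :
    ((PySem.List.pyGetD (c ++ c) ((j : Int)) 0 == 0) &&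
     (PySem.List.pyGetD (c ++ c) ((j : Int) + 1) 0 == 0)) = dz c j := by
  have h1 : ((j : Int) + 1) = ((j + 1 : Nat) : Int) := by push_cast; ring
  rw [h1, PySem.List.pyGetD_natCast, PySem.List.pyGetD_natCast,
    getD_append_self_left c j hj, getD_append_self_mod c j hj, dz]

theorem aLoop_char (c : List Int) (k : Int) (F : Nat)
    (hlt : ∀ t', t' < F → (cntA c t' : Int) < k) (hF : (k : Int) ≤ (cntA c F : Int)) :
    ∀ fuel t, t < F → F ≤ t + fuel → 0 < c.length →
    aLoop (c ++ c) (c.length : Int) k fuel (cntA c t) ((t % c.length : Nat) : Int)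
      = ((F % c.length : Nat) : Int) := by
  intro fuel
  induction fuel with
  | zero => intro t h1 h2 _; omega
  | succ fuel ih =>
    intro t h1 h2 hc
    have hcnt : (cntA c t : Int) < k := hlt t h1
    have hmodi : PySem.Int.mod (((t % c.length : Nat) : Int) + 1) (c.length : Int)
        = (((t + 1) % c.length : Nat) : Int) := by
      rw [PySem.Int.mod_eq_emod_of_pos (by exact_mod_cast hc)]
      have : (((t % c.length : Nat) : Int) + 1) = ((t % c.length + 1 : Nat) : Int) := by
        push_cast; ring
      rw [this, Int.natCast_emod]
      norm_cast
      rw [Nat.mod_add_mod]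
    have hjlt : (t + 1) % c.length < c.length := Nat.mod_lt _ hc
    rw [aLoop, if_pos hcnt]
    simp only [hmodi, state_test c ((t + 1) % c.length) hjlt]
    have hstep : cntA c (t + 1) = cntA c t + (if dz c ((t + 1) % c.length) then 1 else 0) := rfl
    by_cases hd : dz c ((t + 1) % c.length)
    · rw [if_pos hd]
      have hc1 : ((cntA c t : Int) + 1) = ((cntA c (t + 1) : Nat) : Int) := by
        rw [hstep, if_pos hd]; push_cast; ring
      rw [hc1]
      by_cases hstop : t + 1 = F
      · rw [aLoop_stop _ _ _ _ _ _ (by rw [hstop]; omega), hstop]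
      · exact ih (t + 1) (by omega) (by omega) hc
    · rw [if_neg hd]
      have hc1 : ((cntA c t : Int)) = ((cntA c (t + 1) : Nat) : Int) := by
        rw [hstep, if_neg hd]; omega
      rw [hc1]
      by_cases hstop : t + 1 = F
      · rw [aLoop_stop _ _ _ _ _ _ (by rw [hstop]; omega), hstop]
      · exact ih (t + 1) (by omega) (by omega) hc

theorem cntA_add_len (c : List Int) (t : Nat) :
    cntA c (t + c.length) = cntA c t + cntA c c.length := by
  induction t with
  | zero => simp [cntA]
  | succ t ih =>
    have h : t + 1 + c.length = (t + c.length) + 1 := by omega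
    rw [h, cntA, ih]
    have h2 : (t + c.length + 1) % c.length = (t + 1) % c.length := by
      rw [show t + c.length + 1 = (t + 1) + c.length by omega, Nat.add_mod_right]
    rw [h2, cntA]
    omega

theorem cntA_mul_len (c : List Int) (q t : Nat) :
    cntA c (q * c.length + t) = q * cntA c c.length + cntA c t := by
  induction q with
  | zero => simp
  | succ q ih =>
    have h : (q + 1) * c.length + t = (q * c.length + t) + c.length := by ring
    rw [h, cntA_add_len, ih]; ring

theorem cntA_mono (c : List Int) {t t' : Nat} (h : t ≤ t') : cntA c t ≤ cntA c t' := by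
  induction t' with
  | zero => have ht : t = 0 := by omega
            simp [ht]
  | succ t' ih =>
    rcases Nat.lt_or_ge t (t' + 1) with h1 | h1
    · have := ih (by omega)
      have h2 : cntA c t' ≤ cntA c (t' + 1) := by
        rw [cntA]; omega
      omega
    · have : t = t' + 1 := by omega
      simp [this]

theorem cntA_eq_filter (c : List Int) (t : Nat) :
    cntA c t = ((List.range' 1 t).filter (fun u => dz c (u % c.length))).length := by
  induction t with
  | zero => rfl
  | succ t ih =>
    rw [cntA, ih, List.range'_1_concat, List.filter_append]
    simp only [List.length_append]
    by_cases hd : dz c ((1 + t) % c.length)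
    · rw [show (1 + t) = (t + 1) by omega] at hd
      simp [hd, Nat.add_comm 1 t]
    · rw [show (1 + t) = (t + 1) by omega] at hd
      simp [hd, Nat.add_comm 1 t]

theorem filter_index (P : Nat → Bool) :
    ∀ (l : List Nat) (r : Nat), r < (l.filter P).length →
    ∃ j, j < l.length ∧ (l.filter P).getD r 0 = l.getD j 0 ∧ P (l.getD j 0) = true ∧
      ((l.take j).filter P).length = r ∧ ((l.take (j + 1)).filter P).length = r + 1 := by
  intro l
  induction l with
  | nil => intro r hr; simp at hr
  | cons x xs ih =>
    intro r hr
    by_cases hx : P x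
    · rcases r with _ | r'
      · exact ⟨0, by simp, by simp [hx], by simpa using hx, by simp, by simp [hx]⟩
      · have hr' : r' < (xs.filter P).length := by
          simp [hx] at hr; omega
        obtain ⟨j, hj, h1, h2, h3, h4⟩ := ih r' hr'
        exact ⟨j + 1, by simp; omega, by simpa [hx] using h1,
          by simpa using h2, by simp [hx, h3],
          by simp [hx, h4]⟩
    · have hr' : r < (xs.filter P).length := by
        simpa [hx] using hr
      obtain ⟨j, hj, h1, h2, h3, h4⟩ := ih r hr'
      exact ⟨j + 1, by simp; omega, by simpa [hx] using h1,
        by simpa using h2, by simp [hx, h3],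
        by simp [hx, h4]⟩

theorem take_range'_one (j n : Nat) (h : j ≤ n) :
    (List.range' 1 n).take j = List.range' 1 j := by
  exact List.take_range'_of_length_ge h

theorem getD_range'_one (j n : Nat) (h : j < n) :
    (List.range' 1 n).getD j 0 = 1 + j := by
  rw [List.getD_eq_getElem?_getD, List.getElem?_range' h]
  simp

theorem slice_rot (c : List Int) (i0 : Nat) (h : i0 < c.length) :
    PySem.List.slice (c ++ c) (some ((i0 : Nat) : Int))
      (some (((i0 + c.length : Nat) : Nat) : Int)) = c.drop i0 ++ c.take i0 := by
  rw [PySem.List.slice_natCast]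
  rw [List.drop_append]
  have h1 : i0 - c.length = 0 := by omega
  rw [h1, List.drop_zero]
  rw [List.take_append]
  have h2 : (c.drop i0).length = c.length - i0 := by simp
  rw [List.take_of_length_le (by omega), h2]
  congr 1
  congr 1
  omega

theorem rot_length (c : List Int) (i0 : Nat) (h : i0 < c.length) :
    (c.drop i0 ++ c.take i0).length = c.length := by
  simp; omega

-- the filter predicate written in port B agrees with dz ∘ (· % n) on every input
theorem predB_eq (c : List Int) (t : Nat) :
    (c.getD (t % c.length) 0 == 0 && c.getD ((t + 1) % c.length) 0 == 0)
      = dz c (t % c.length) := by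
  rw [dz, Nat.mod_add_mod]

-- membership witness: Pre_'s double zero gives a hit in range' 1 n
theorem hits_pos (c : List Int) (j : Nat) (hc : 0 < c.length) (hj : j < c.length)
    (h : dz c j = true) :
    0 < ((List.range' 1 c.length).filter (fun u => dz c (u % c.length))).length := by
  set t := if j = 0 then c.length else j with ht
  have hmem : t ∈ List.range' 1 c.length := by
    rw [List.mem_range'_1]
    constructor <;> (rw [ht]; split <;> omega)
  have hmod : t % c.length = j := by
    rw [ht]; split
    · simp [Nat.mod_self]; omega
    · exact Nat.mod_eq_of_lt hj
  have : t ∈ (List.range' 1 c.length).filter (fun u => dz c (u % c.length)) :=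
    List.mem_filter.mpr ⟨hmem, by rw [hmod]; exact h⟩
  exact List.length_pos_of_mem this

-- main equivalence
theorem main_equiv (s : List Int) (k : Int) (hPre : Pre_twoZero_shift s k) :
    twoZero_shift s k = twoZero_shift_alt s k := by
  set c : List Int := 0 :: s with hc
  have hn : c.length = s.length + 1 := by simp [hc]
  have hc0 : 0 < c.length := by omega
  by_cases hk : k ≤ 0
  · -- cnt = 0 is already ≥ k: loop body never runs, i = 0 on both sides
    simp only [twoZero_shift, twoZero_shift_alt, ← hc]
    rw [aLoop_stop _ _ _ _ _ _ (by omega), if_pos hk]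
    have h0 : (0 : Int) + (s.length : Int) + 1 = (((0 + c.length : Nat) : Nat) : Int) := by
      push_cast [hn]; ring
    rw [h0, show (0 : Int) = ((0 : Nat) : Int) by norm_cast,
      slice_rot c 0 hc0, ifNk_eq_bNecklace, rot_length c 0 hc0, hn]
  · -- k ≥ 1: characterise the stopping position of A's loop
    obtain ⟨j, hjmem, hjz1, hjz2⟩ := hPre.resolve_left hk
    have hjlt : j < c.length := by rw [hn]; exact List.mem_range.mp hjmem
    have hdzj : dz c j = true := by
      unfold dz
      have e1 : c.getD j 0 = 0 := by rw [hc]; exact hjz1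
      have e2 : c.getD ((j + 1) % c.length) 0 = 0 := by rw [hn, hc]; exact hjz2
      rw [e1, e2]; rfl
    set P : Nat → Bool := fun u => dz c (u % c.length) with hP
    set L := (List.range' 1 c.length).filter P with hL
    set m := L.length with hm
    have hm0 : 0 < m := hits_pos c j hc0 hjlt hdzj
    set K := (k - 1).toNat with hK
    have hkK : k = (K : Int) + 1 := by omega
    set q := K / m with hq
    set r := K % m with hr
    have hrm : r < m := Nat.mod_lt _ hm0
    obtain ⟨j0, hj0, hgd, hPd, htj, htj1⟩ := filter_index P (List.range' 1 c.length) r hrm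
    simp only [List.length_range'] at hj0
    have hd_eq : (List.range' 1 c.length).getD j0 0 = 1 + j0 := getD_range'_one j0 _ hj0
    set d := 1 + j0 with hd
    have hdle : d ≤ c.length := by omega
    have hcnt_d1 : cntA c j0 = r := by
      rw [cntA_eq_filter, ← take_range'_one j0 c.length (by omega), htj]
    have hcnt_d : cntA c d = r + 1 := by
      rw [show d = j0 + 1 by omega, cntA_eq_filter,
        ← take_range'_one (j0 + 1) c.length (by omega), htj1]
    have hcnt_n : cntA c c.length = m := by rw [cntA_eq_filter]
    set F := q * c.length + d with hF
    have hKqr : K = q * m + r := by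
      rw [Nat.mul_comm]; exact (Nat.div_add_mod K m).symm
    have hcntF : cntA c F = K + 1 := by
      rw [hF, cntA_mul_len, hcnt_n, hcnt_d]; omega
    have hge : (k : Int) ≤ (cntA c F : Int) := by rw [hcntF, hkK]; push_cast; omega
    have hlt : ∀ t', t' < F → (cntA c t' : Int) < k := by
      intro t' ht'
      rw [hF, hd] at ht'
      have h1 : t' ≤ q * c.length + j0 := by omega
      have h2 : cntA c t' ≤ cntA c (q * c.length + j0) := cntA_mono c h1
      rw [cntA_mul_len, hcnt_n, hcnt_d1] at h2
      have : cntA c t' ≤ K := by omega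
      rw [hkK]; omega
    have hfuel : F ≤ k.toNat * c.length := by
      have hq1 : q ≤ K := Nat.div_le_self _ _
      have : F ≤ (q + 1) * c.length := by rw [hF]; nlinarith [hdle]
      have h2 : (q + 1) * c.length ≤ (K + 1) * c.length :=
        Nat.mul_le_mul_right _ (by omega)
      have h3 : k.toNat = K + 1 := by omega
      rw [h3]; omega
    have hF0 : 0 < F := by omega
    -- A's loop result
    have hA := aLoop_char c k F hlt hge (k.toNat * c.length) 0 hF0 (by omega) hc0
    simp only [Nat.zero_mod, Nat.cast_zero, show cntA c 0 = 0 from rfl] at hA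
    have hFmod : F % c.length = d % c.length := by
      rw [hF, Nat.mul_comm, Nat.mul_add_mod]
    -- B's index
    set i0 := d % c.length with hi0
    have hi0lt : i0 < c.length := Nat.mod_lt _ hc0
    have hBfilter : ((List.range' 1 c.length).filter
        (fun t => c.getD (t % c.length) 0 == 0 && c.getD ((t + 1) % c.length) 0 == 0)) = L := by
      rw [hL]
      exact List.filter_congr (fun t _ => by rw [predB_eq, hP])
    have hBidx : (L.map (· % c.length)).getD
        ((PySem.Int.mod (k - 1) ((L.map (· % c.length)).length : Int)).toNat) 0 = i0 := by
      have hlen : (L.map (· % c.length)).length = m := by simp [hm]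
      have hk1 : (k - 1 : Int) = (K : Int) := by omega
      rw [hlen, hk1, PySem.Int.mod_eq_emod_of_pos (by exact_mod_cast hm0),
        ← Int.natCast_emod, Int.toNat_natCast, ← hr]
      rw [List.getD_eq_getElem?_getD, List.getElem?_map]
      have hrL : r < L.length := hrm
      rw [List.getElem?_eq_getElem hrL]
      simp only [Option.map_some, Option.getD_some]
      rw [hi0]
      congr 1
      rw [← List.getD_eq_getElem _ 0 hrL, hgd, hd_eq]
    -- assemble
    simp only [twoZero_shift, twoZero_shift_alt, ← hc]
    rw [if_neg hk, ← hn]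
    have hni : ((s.length : Int) + 1) = ((c.length : Nat) : Int) := by rw [hn]; push_cast; ring
    rw [hni, hBfilter, hBidx, hA, hFmod]
    have hb : (((i0 : Nat) : Int) + (s.length : Int) + 1) = (((i0 + c.length : Nat) : Nat) : Int) := by
      push_cast [hn]; ring
    rw [hb, slice_rot c i0 hi0lt, ifNk_eq_bNecklace, rot_length c i0 hi0lt]

-- ===== VERDICT (by name: the statement is the Claim_ definition above) =====
theorem twoZero_shift_spec : Claim_equal_twoZero_shift := by
  intro s k _ hPre
  unfold Spec_twoZero_shift
  exact main_equiv s k hPre
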